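-- pv_equiv track=rewrite | github.com/Arsen1302/Code-copy-detector | TestData/solutions/problem_819_5.py | solution_819_5
-- ===== SOURCE A (Python) =====
-- from typing import List
--
-- def solution_819_5(nums: List[int], k: int) -> int:
--     stack=[]
--     preOdd=True
--     for i in nums:
--         if i%2==1:
--             if preOdd:
--                 stack.append(1)
--         else:
--             if preOdd:
--                 stack.append(2)
--             else:
--                 stack[-1]+=1
--         preOdd=i%2==1
--     if preOdd:
--         stack.append(1)
--
--     return sum([stack[j]*stack[j+k] for j in range(len(stack)-k)])
-- ===== SOURCE B (Python) =====
-- from typing import List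
--
-- def solution_819_5(nums: List[int], k: int) -> int:
--     pos = [-1] + [i for i, x in enumerate(nums) if x % 2 == 1] + [len(nums)]
--     stack = [pos[j + 1] - pos[j] for j in range(len(pos) - 1)]
--     return sum(stack[j] * stack[j + k] for j in range(len(stack) - k))
-- ===== Notes on version B (the rewrite author's own statement) =====
-- stated objective: simpler
-- what changed: Replaces A's single stateful pass (preOdd flag with conditional append / last-element increment plus a trailing append) by two stateless passes: collect the odd-element positions with sentinels -1 and len(nums), then take adjacent differences; the final windowed product sum is unchanged.
import Mathlib
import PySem

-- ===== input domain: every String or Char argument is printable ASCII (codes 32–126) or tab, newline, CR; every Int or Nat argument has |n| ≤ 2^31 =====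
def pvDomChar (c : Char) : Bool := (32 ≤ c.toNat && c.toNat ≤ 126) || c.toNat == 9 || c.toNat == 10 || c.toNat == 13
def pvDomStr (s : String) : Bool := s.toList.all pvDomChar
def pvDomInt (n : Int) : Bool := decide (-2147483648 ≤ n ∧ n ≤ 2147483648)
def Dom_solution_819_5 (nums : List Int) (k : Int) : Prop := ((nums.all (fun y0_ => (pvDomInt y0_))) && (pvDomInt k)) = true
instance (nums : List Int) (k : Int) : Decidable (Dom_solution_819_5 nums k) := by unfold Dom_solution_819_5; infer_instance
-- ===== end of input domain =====

-- B replaces A's stateful preOdd-flag pass by two stateless passes (odd positions with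
-- sentinels, then adjacent differences); same cost, simpler decomposition.

-- ===== PORT A =====
-- stack[-1] += 1  (only reached with a nonempty stack in A)
def pvIncLast : List Int → List Int
  | [] => []
  | [x] => [x + 1]
  | x :: y :: xs => x :: pvIncLast (y :: xs)

-- one iteration of A's for-loop: state = (stack, preOdd)
def pvStepA (st : List Int × Bool) (i : Int) : List Int × Bool :=
  let stack :=
    if PySem.Int.mod i 2 == 1 then
      if st.2 then st.1 ++ [1] else st.1
    else
      if st.2 then st.1 ++ [2] else pvIncLast st.1
  (stack, PySem.Int.mod i 2 == 1)

-- sum([stack[j]*stack[j+k] for j in range(len(stack)-k)])  (shared final line of A and B;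
-- pyGetD is exact under Pre_ 0 ≤ k, where every index is in range)
def pvWindowSum (stack : List Int) (k : Int) : Int :=
  ((PySem.List.pyRange 0 ((stack.length : Int) - k) 1).map
    (fun j => PySem.List.pyGetD stack j 0 * PySem.List.pyGetD stack (j + k) 0)).sum

def solution_819_5 (nums : List Int) (k : Int) : Int :=
  let st := nums.foldl pvStepA ([], true)
  let stack := if st.2 then st.1 ++ [1] else st.1
  pvWindowSum stack k

-- ===== PORT B =====
def solution_819_5_alt (nums : List Int) (k : Int) : Int :=
  let pos : List Int :=
    [-1] ++ (PySem.List.enumerate nums 0).filterMap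
              (fun p => if PySem.Int.mod p.2 2 == 1 then some p.1 else none)
          ++ [(nums.length : Int)]
  let stack := (PySem.List.pyRange 0 ((pos.length : Int) - 1) 1).map
    (fun j => PySem.List.pyGetD pos (j + 1) 0 - PySem.List.pyGetD pos j 0)
  pvWindowSum stack k

-- ===== PRECONDITION & SPEC =====
-- Pre_ excludes k < 0, on which Python A raises IndexError (stack[j] for j ≥ len(stack)).
def Pre_solution_819_5 (nums : List Int) (k : Int) : Prop := 0 ≤ k
instance (nums : List Int) (k : Int) : Decidable (Pre_solution_819_5 nums k) := by
  unfold Pre_solution_819_5; infer_instance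
def pvWitness_solution_819_5 : List Int × Int := ([1, 2, 2, 3, 5], 1)

def Spec_solution_819_5 (nums : List Int) (k : Int) (out : Int) : Prop := out = solution_819_5_alt nums k
instance (nums : List Int) (k : Int) (out : Int) : Decidable (Spec_solution_819_5 nums k out) := by unfold Spec_solution_819_5; infer_instance

-- ===== CLAIM (what is proved, stated in full; the proofs are below) =====
def Claim_equal_solution_819_5 : Prop := ∀ (nums : List Int) (k : Int), Dom_solution_819_5 nums k → Pre_solution_819_5 nums k → Spec_solution_819_5 nums k (solution_819_5 nums k)

-- ===== LEMMAS AND PROOFS =====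

-- proof-side objects
def pvOddPos (nums : List Int) : List Int :=
  (PySem.List.enumerate nums 0).filterMap
    (fun p => if PySem.Int.mod p.2 2 == 1 then some p.1 else none)

def pvPreB (nums : List Int) : Bool :=
  match nums.getLast? with
  | some x => PySem.Int.mod x 2 == 1
  | none => true

def pvAdjDiffs : List Int → List Int
  | a :: b :: r => (b - a) :: pvAdjDiffs (b :: r)
  | _ => []

theorem pvIncLast_append (s : List Int) (c : Int) :
    pvIncLast (s ++ [c]) = s ++ [c + 1] := by
  induction s with
  | nil => rfl
  | cons x xs ih =>
    cases xs with
    | nil => simp [pvIncLast]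
    | cons y ys => simpa [pvIncLast] using ih

theorem pvAdjDiffs_append (a : Int) (l : List Int) (b : Int) :
    pvAdjDiffs (a :: l ++ [b]) = pvAdjDiffs (a :: l) ++ [b - (a :: l).getLastD 0] := by
  induction l generalizing a with
  | nil => rfl
  | cons x xs ih => simpa [pvAdjDiffs] using ih x

theorem pvOddPos_append (nums : List Int) (x : Int) :
    pvOddPos (nums ++ [x]) =
      pvOddPos nums ++ (if PySem.Int.mod x 2 == 1 then [(nums.length : Int)] else []) := by
  unfold pvOddPos
  rw [PySem.List.enumerate_append, List.filterMap_append]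
  congr 1
  rw [PySem.List.enumerate_cons, PySem.List.enumerate_nil]
  by_cases h : x % 2 = 1
  · simp [List.filterMap, h]
  · simp [List.filterMap, h]

theorem pvPreB_append (nums : List Int) (x : Int) :
    pvPreB (nums ++ [x]) = (PySem.Int.mod x 2 == 1) := by
  unfold pvPreB
  rw [List.getLast?_concat]

-- when the last element is odd, the last recorded odd position is len - 1
theorem pvLast_oddPos (nums : List Int) (h : pvPreB nums = true) :
    ((-1 : Int) :: pvOddPos nums).getLastD 0 = (nums.length : Int) - 1 := by
  rcases List.eq_nil_or_concat nums with rfl | ⟨ys, x, rfl⟩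
  · simp [pvOddPos, PySem.List.enumerate_nil]
  · rw [List.concat_eq_append] at h ⊢
    rw [pvPreB_append] at h
    rw [pvOddPos_append, h]
    rw [if_pos rfl, ← List.cons_append, List.getLastD_concat]
    simp only [List.length_append, List.length_cons, List.length_nil]
    push_cast
    omega

-- the loop invariant: A's fold computes the adjacent differences of the sentinel list
theorem pvFold_inv (nums : List Int) :
    nums.foldl pvStepA ([], true) =
      (pvAdjDiffs ((-1 : Int) :: pvOddPos nums ++
          (if pvPreB nums then [] else [(nums.length : Int)])),
       pvPreB nums) := by
  induction nums using List.reverseRecOn with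
  | nil => simp [pvOddPos, pvPreB, PySem.List.enumerate_nil, pvAdjDiffs]
  | append_singleton ys x ih =>
    rw [List.foldl_append, ih, List.foldl_cons, List.foldl_nil]
    rw [pvPreB_append, pvOddPos_append]
    unfold pvStepA
    by_cases hx : PySem.Int.mod x 2 == 1
    · simp only [hx, if_true]
      by_cases hp : pvPreB ys
      · simp only [hp, if_true]
        have h1 := pvAdjDiffs_append (-1) (pvOddPos ys) ((ys.length : Int))
        rw [pvLast_oddPos ys hp] at h1
        simp only [List.cons_append] at h1
        simp only [List.append_nil]
        rw [h1]
        norm_num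
      · simp only [hp, Bool.false_eq_true, if_false]
        simp
    · simp only [hx, if_false, Bool.false_eq_true]
      by_cases hp : pvPreB ys
      · simp only [hp, if_true]
        have h1 := pvAdjDiffs_append (-1) (pvOddPos ys) (((ys ++ [x]).length : Int))
        rw [pvLast_oddPos ys hp] at h1
        simp only [List.cons_append] at h1
        simp only [List.append_nil, List.cons_append]
        rw [h1]
        simp
      · simp only [hp, Bool.false_eq_true, if_false]
        have h1 := pvAdjDiffs_append (-1) (pvOddPos ys) ((ys.length : Int))
        have h2 := pvAdjDiffs_append (-1) (pvOddPos ys) (((ys ++ [x]).length : Int))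
        simp only [List.cons_append] at h1 h2
        simp only [List.append_nil, List.cons_append]
        rw [h1, h2, pvIncLast_append]
        simp
        omega

-- A's final stack (after the trailing append) equals the full sentinel difference list
theorem pvStackA_eq (nums : List Int) :
    (if (nums.foldl pvStepA ([], true)).2
      then (nums.foldl pvStepA ([], true)).1 ++ [1]
      else (nums.foldl pvStepA ([], true)).1) =
    pvAdjDiffs ((-1 : Int) :: pvOddPos nums ++ [(nums.length : Int)]) := by
  rw [pvFold_inv]
  by_cases hp : pvPreB nums
  · simp only [hp, if_true]
    have h1 := pvAdjDiffs_append (-1) (pvOddPos nums) ((nums.length : Int))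
    rw [pvLast_oddPos nums hp] at h1
    simp only [List.cons_append] at h1
    simp only [List.append_nil, List.cons_append]
    rw [h1]
    norm_num
  · have hp' : pvPreB nums = false := by simpa using hp
    rw [hp']
    norm_num

-- B's difference comprehension computes pvAdjDiffs (stated on List.getD after cast removal)
theorem pvGetD_diffs (pos : List Int) :
    (List.range (pos.length - 1)).map
      (fun m => pos.getD (m + 1) 0 - pos.getD m 0) = pvAdjDiffs pos := by
  induction pos with
  | nil => rfl
  | cons a l ih =>
    cases l with
    | nil => rfl
    | cons b r =>
      have hlen : (a :: b :: r).length - 1 = (b :: r).length - 1 + 1 := by simp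
      rw [hlen, List.range_succ_eq_map, List.map_cons, List.map_map]
      rw [pvAdjDiffs]
      congr 1

theorem pvStackB_eq (nums : List Int) :
    ((PySem.List.pyRange 0
        (((((-1 : Int) :: pvOddPos nums ++ [(nums.length : Int)]).length : Int) - 1)) 1).map
      (fun j => PySem.List.pyGetD ((-1 : Int) :: pvOddPos nums ++ [(nums.length : Int)]) (j + 1) 0
              - PySem.List.pyGetD ((-1 : Int) :: pvOddPos nums ++ [(nums.length : Int)]) j 0)) =
    pvAdjDiffs ((-1 : Int) :: pvOddPos nums ++ [(nums.length : Int)]) := by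
  set pos := (-1 : Int) :: pvOddPos nums ++ [(nums.length : Int)] with hpos
  rw [PySem.List.pyRange_one, List.map_map]
  rw [← pvGetD_diffs pos]
  have hnat : ((pos.length : Int) - 1 - 0).toNat = pos.length - 1 := by omega
  rw [hnat]
  apply List.map_congr_left
  intro m _
  simp only [Function.comp]
  rw [show ((0 : Int) + (m : Int) + 1) = (((m + 1 : Nat)) : Int) by push_cast; ring,
      show ((0 : Int) + (m : Int)) = ((m : Nat) : Int) by ring,
      PySem.List.pyGetD_natCast, PySem.List.pyGetD_natCast]

-- ===== VERDICT (by name: the statement is the Claim_ definition above) =====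
theorem solution_819_5_spec : Claim_equal_solution_819_5 := by
  intro nums k _ _
  unfold Spec_solution_819_5 solution_819_5 solution_819_5_alt
  simp only []
  rw [pvStackA_eq]
  congr 1
  have h : ([(-1 : Int)] ++ pvOddPos nums ++ [(nums.length : Int)]) =
      ((-1 : Int) :: pvOddPos nums ++ [(nums.length : Int)]) := by simp
  rw [show ((PySem.List.enumerate nums 0).filterMap
        (fun p => if PySem.Int.mod p.2 2 == 1 then some p.1 else none)) = pvOddPos nums from rfl]
  rw [h, pvStackB_eq]
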